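-- pv_equiv track=rewrite | github.com/zbyju/advent-of-code | AoC2019/day04/part2/solution.py | check
-- ===== SOURCE A (Python) =====
-- def check(num):
--     code = str(num)
--     substringLength2 = False
--     currentSubstring = 0
--     substringChar = 'X'
--     isIncreasing = True
--     for i in range(0, len(code)):
--         if(i < len(code) - 1 and code[i] > code[i + 1]):
--             isIncreasing = False
--         if(substringChar == code[i]):
--             currentSubstring += 1
--         else:
--             if(currentSubstring == 2):
--                 substringLength2 = True
--             substringChar = code[i]
--             currentSubstring = 1
--
--     if(currentSubstring == 2):
--         substringLength2 = True
--     return substringLength2 and isIncreasing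
-- ===== SOURCE B (Python) =====
-- def _runs(c, n, rest):
--     if not rest:
--         return [n]
--     if rest[0] == c:
--         return _runs(c, n + 1, rest[1:])
--     return [n] + _runs(rest[0], 1, rest[1:])
--
--
-- def check(num):
--     code = str(num)
--     has_pair = 2 in _runs(code[0], 1, code[1:])
--     increasing = all(a <= b for a, b in zip(code, code[1:]))
--     return has_pair and increasing
-- ===== Notes on version B (the rewrite author's own statement) =====
-- stated objective: simpler
-- what changed: A's single indexed loop with four mutable flags and a lookahead guard is replaced by two independent checks on str(num): a recursive run-length decomposition (a pair exists iff some run has length exactly 2) and a zip-with-tail non-decreasing test.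
import Mathlib
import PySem

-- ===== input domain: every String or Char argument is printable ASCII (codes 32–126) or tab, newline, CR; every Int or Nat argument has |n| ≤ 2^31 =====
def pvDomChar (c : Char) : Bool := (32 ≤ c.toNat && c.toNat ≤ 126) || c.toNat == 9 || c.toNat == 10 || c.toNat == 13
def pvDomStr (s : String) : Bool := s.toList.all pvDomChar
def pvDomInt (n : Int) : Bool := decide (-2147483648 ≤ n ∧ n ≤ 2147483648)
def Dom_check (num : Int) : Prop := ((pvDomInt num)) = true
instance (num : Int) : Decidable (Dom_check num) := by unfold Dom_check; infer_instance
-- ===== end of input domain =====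

-- B replaces A's single indexed loop with four streaming flags by two independent one-pass
-- checks on str(num): a recursive run-length decomposition (some run of length exactly 2 ⇒ pair)
-- and a zip-with-tail non-decreasing test (objective: simpler decomposition, same cost).

-- ===== PORT A =====
-- literal port of A's indexed loop; state = (substringLength2, currentSubstring, substringChar, isIncreasing)
def check (num : Int) : Bool :=
  let code := (PySem.Int.toStr num).toList
  let st :=
    (PySem.List.pyRange 0 (PySem.List.len code) 1).foldl
      (fun (st : Bool × Int × Char × Bool) i =>
        let (sl2, cur, ch, inc) := st
        let inc :=
          if i < PySem.List.len code - 1 ∧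
              PySem.List.pyGetD code (i + 1) 'X' < PySem.List.pyGetD code i 'X' then false
          else inc
        if ch = PySem.List.pyGetD code i 'X' then (sl2, cur + 1, ch, inc)
        else ((if cur = 2 then true else sl2), (1 : Int), PySem.List.pyGetD code i 'X', inc))
      (false, (0 : Int), 'X', true)
  let sl2 := if st.2.1 = 2 then true else st.1
  sl2 && st.2.2.2

-- ===== PORT B =====
-- port of Source B's _runs: run lengths of the char stream, given the current run's char and count
def runsB (c : Char) (n : Int) : List Char → List Int
  | [] => [n]
  | d :: rest => if d = c then runsB c (n + 1) rest else n :: runsB d 1 rest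

def check_alt (num : Int) : Bool :=
  let code := (PySem.Int.toStr num).toList
  match code with
  | [] => false   -- unreachable: str(num) is never empty (Source B's code[0] presupposes this)
  | c :: rest =>
    let hasPair := (runsB c 1 rest).contains 2
    let increasing := (code.zip rest).all (fun p => p.1 ≤ p.2)
    hasPair && increasing

-- ===== PRECONDITION & SPEC =====
def Spec_check (num : Int) (out : Bool) : Prop := out = check_alt num
instance (num : Int) (out : Bool) : Decidable (Spec_check num out) := by unfold Spec_check; infer_instance

-- ===== CLAIM (what is proved, stated in full; the proofs are below) =====
def Claim_equal_check : Prop := ∀ (num : Int), Dom_check num → Spec_check num (check num)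

-- ===== LEMMAS AND PROOFS =====

-- A's loop body, as a structural recursion over the remaining characters
def stepA (st : Bool × Int × Char × Bool) : List Char → Bool × Int × Char × Bool
  | [] => st
  | c :: rest =>
    let (sl2, cur, ch, inc) := st
    let inc := match rest with
      | [] => inc
      | d :: _ => if d < c then false else inc
    if ch = c then stepA (sl2, cur + 1, ch, inc) rest
    else stepA ((if cur = 2 then true else sl2), (1 : Int), c, inc) rest

lemma stepA_cons (sl2 : Bool) (cur : Int) (ch : Char) (inc : Bool) (c : Char) (rest : List Char) :
    stepA (sl2, cur, ch, inc) (c :: rest) =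
      (if ch = c then
        stepA (sl2, cur + 1, ch,
          (match rest with | [] => inc | d :: _ => if d < c then false else inc)) rest
      else
        stepA ((if cur = 2 then true else sl2), (1 : Int), c,
          (match rest with | [] => inc | d :: _ => if d < c then false else inc)) rest) := rfl

-- A's indexed foldl over code = pre ++ l, starting at index pre.length, is stepA on l
lemma foldl_eq_stepA (l : List Char) : ∀ (pre : List Char) (st : Bool × Int × Char × Bool),
    (PySem.List.pyRange pre.length (pre.length + l.length) 1).foldl
      (fun (st : Bool × Int × Char × Bool) i =>
        let (sl2, cur, ch, inc) := st
        let inc :=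
          if i < PySem.List.len (pre ++ l) - 1 ∧
              PySem.List.pyGetD (pre ++ l) (i + 1) 'X' < PySem.List.pyGetD (pre ++ l) i 'X' then false
          else inc
        if ch = PySem.List.pyGetD (pre ++ l) i 'X' then (sl2, cur + 1, ch, inc)
        else ((if cur = 2 then true else sl2), (1 : Int), PySem.List.pyGetD (pre ++ l) i 'X', inc))
      st = stepA st l := by
  induction l with
  | nil =>
    intro pre st
    rw [PySem.List.pyRange_one_eq_nil (by simp)]
    rfl
  | cons c rest ih =>
    intro pre st
    obtain ⟨sl2, cur, ch, inc⟩ := st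
    rw [PySem.List.pyRange_one_cons (by push_cast [List.length_cons]; omega)]
    rw [List.foldl_cons]
    have h1 : PySem.List.pyGetD (pre ++ c :: rest) (pre.length : Int) 'X' = c := by simp
    have hstep : ∀ st' : Bool × Int × Char × Bool,
        (PySem.List.pyRange ((pre.length : Int) + 1) (pre.length + (c :: rest).length) 1).foldl
          (fun (st : Bool × Int × Char × Bool) i =>
            let (sl2, cur, ch, inc) := st
            let inc :=
              if i < PySem.List.len (pre ++ c :: rest) - 1 ∧
                  PySem.List.pyGetD (pre ++ c :: rest) (i + 1) 'X' < PySem.List.pyGetD (pre ++ c :: rest) i 'X' then false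
              else inc
            if ch = PySem.List.pyGetD (pre ++ c :: rest) i 'X' then (sl2, cur + 1, ch, inc)
            else ((if cur = 2 then true else sl2), (1 : Int), PySem.List.pyGetD (pre ++ c :: rest) i 'X', inc))
          st' = stepA st' rest := by
      intro st'
      have h := ih (pre ++ [c]) st'
      simp only [List.append_assoc, List.singleton_append] at h
      have e1 : (((pre ++ [c]).length : Nat) : Int) = (pre.length : Int) + 1 := by
        push_cast [List.length_append, List.length_cons, List.length_nil]; ring
      have e2 : ((pre.length : Int) + 1) + (rest.length : Int) = (pre.length : Int) + ((c :: rest).length : Int) := by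
        push_cast [List.length_cons]; ring
      rw [e1, e2] at h
      exact h
    rw [stepA_cons]
    cases rest with
    | nil =>
      have hcond : ¬ ((pre.length : Int) < PySem.List.len (pre ++ [c]) - 1 ∧
          PySem.List.pyGetD (pre ++ [c]) ((pre.length : Int) + 1) 'X' < c) := by
        simp [PySem.List.len_eq]
      simp only [h1, if_neg hcond]
      rw [hstep]
      exact apply_ite (fun st => stepA st []) _ _ _
    | cons d r =>
      have h2 : PySem.List.pyGetD (pre ++ c :: d :: r) ((pre.length : Int) + 1) 'X' = d := by
        have e : ((pre.length : Int) + 1) = ((pre.length + 1 : Nat) : Int) := by push_cast; ring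
        rw [e, PySem.List.pyGetD_natCast]
        simp [List.getD]
      have hcond : ((pre.length : Int) < PySem.List.len (pre ++ c :: d :: r) - 1 ∧
          d < c) ↔ (d < c) := by
        constructor
        · exact And.right
        · intro hd
          refine ⟨?_, hd⟩
          simp only [PySem.List.len_eq, List.length_append, List.length_cons]
          push_cast; omega
      simp only [h1, h2, hcond]
      rw [hstep]
      exact apply_ite (fun st => stepA st (d :: r)) _ _ _

-- the isIncreasing component of A's loop is B's zip-with-tail test
lemma stepA_inc (l : List Char) : ∀ (sl2 : Bool) (cur : Int) (ch : Char) (inc : Bool),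
    (stepA (sl2, cur, ch, inc) l).2.2.2 = (inc && (l.zip l.tail).all (fun p => p.1 ≤ p.2)) := by
  induction l with
  | nil => intro sl2 cur ch inc; simp [stepA]
  | cons c rest ih =>
    intro sl2 cur ch inc
    rw [stepA_cons]
    cases rest with
    | nil =>
      by_cases hch : ch = c <;> simp [hch, stepA]
    | cons d r =>
      by_cases hch : ch = c <;> by_cases hdc : d < c <;>
        simp [hch, hdc, ih] <;>
        first
          | simp [not_le.mpr hdc]
          | simp [not_lt.mp hdc]

-- the pair component of A's loop (with its post-loop check) is B's run-length test
lemma stepA_pair (l : List Char) : ∀ (sl2 : Bool) (cur : Int) (ch : Char) (inc : Bool),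
    (if (stepA (sl2, cur, ch, inc) l).2.1 = 2 then true else (stepA (sl2, cur, ch, inc) l).1)
      = (sl2 || (runsB ch cur l).contains 2) := by
  induction l with
  | nil =>
    intro sl2 cur ch inc
    by_cases h : cur = 2 <;> simp [stepA, runsB, h, eq_comm]
  | cons c rest ih =>
    intro sl2 cur ch inc
    rw [stepA_cons]
    by_cases hch : ch = c
    · subst hch
      rw [if_pos rfl]
      rw [ih]
      simp [runsB]
    · rw [if_neg hch]
      rw [ih]
      have : (runsB ch cur (c :: rest)).contains 2 = ((cur == 2) || (runsB c 1 rest).contains 2) := by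
        simp only [runsB, if_neg (fun h : c = ch => hch h.symm)]
        by_cases h2 : cur = 2
        · simp [h2]
        · simp [h2, Ne.symm h2]
      rw [this]
      by_cases h2 : cur = 2
      · simp [h2]
      · rw [beq_eq_false_iff_ne.mpr h2]
        simp [h2]

-- A's first iteration always lands in state (false, 1, c, inc'): either branch yields it when cur = 0
lemma stepA_first (c : Char) (rest : List Char) :
    stepA (false, (0 : Int), 'X', true) (c :: rest) =
      stepA (false, (1 : Int), c,
        (match rest with | [] => true | d :: _ => if d < c then false else true)) rest := by
  rw [stepA_cons]
  by_cases hx : ('X' : Char) = c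
  · rw [if_pos hx, hx]
    norm_num
  · rw [if_neg hx]
    norm_num

-- ===== VERDICT (by name: the statement is the Claim_ definition above) =====
theorem check_spec : Claim_equal_check := by
  intro num _
  unfold Spec_check check check_alt
  generalize (PySem.Int.toStr num).toList = code
  have key : ∀ st : Bool × Int × Char × Bool,
      (PySem.List.pyRange 0 (PySem.List.len code) 1).foldl
        (fun (st : Bool × Int × Char × Bool) i =>
          let (sl2, cur, ch, inc) := st
          let inc :=
            if i < PySem.List.len code - 1 ∧
                PySem.List.pyGetD code (i + 1) 'X' < PySem.List.pyGetD code i 'X' then false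
            else inc
          if ch = PySem.List.pyGetD code i 'X' then (sl2, cur + 1, ch, inc)
          else ((if cur = 2 then true else sl2), (1 : Int), PySem.List.pyGetD code i 'X', inc))
        st = stepA st code := fun st => by simpa using foldl_eq_stepA code [] st
  simp only [key]
  cases code with
  | nil => simp [stepA]
  | cons c rest =>
    rw [stepA_first]
    rw [stepA_inc, stepA_pair]
    cases rest with
    | nil => simp [List.zip]
    | cons d r =>
      by_cases hdc : d < c
      · simp [hdc, not_le.mpr hdc]
      · simp [hdc, not_lt.mp hdc]
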